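-- pv_equiv track=rewrite | github.com/Franna88/medwave | assign_ad_ids_improved.py | extract_h_ad_id_from_attributions
-- ===== SOURCE A (Python) =====
-- def extract_h_ad_id_from_attributions(opp):
--     """Extract h_ad_id from opportunity attributions"""
--     attributions = opp.get('attributions', [])
--
--     if not attributions:
--         return None
--
--     # Check in reverse order (most recent first)
--     for attr in reversed(attributions):
--         h_ad_id = attr.get('h_ad_id') or attr.get('utmAdId') or attr.get('adId')
--         if h_ad_id:
--             return h_ad_id
--
--     return None
-- ===== SOURCE B (Python) =====
-- def extract_h_ad_id_from_attributions(opp):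
--     """Extract h_ad_id from opportunity attributions"""
--     last = None
--     for attr in opp.get('attributions', []):
--         cand = attr.get('h_ad_id') or attr.get('utmAdId') or attr.get('adId')
--         if cand:
--             last = cand
--     return last
-- ===== Notes on version B (the rewrite author's own statement) =====
-- stated objective: simpler
-- what changed: Replaced the reversed scan with early return (and its separate empty-list guard) by a single forward pass that keeps overwriting an accumulator with the latest truthy candidate and returns it after the loop.
import Mathlib
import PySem

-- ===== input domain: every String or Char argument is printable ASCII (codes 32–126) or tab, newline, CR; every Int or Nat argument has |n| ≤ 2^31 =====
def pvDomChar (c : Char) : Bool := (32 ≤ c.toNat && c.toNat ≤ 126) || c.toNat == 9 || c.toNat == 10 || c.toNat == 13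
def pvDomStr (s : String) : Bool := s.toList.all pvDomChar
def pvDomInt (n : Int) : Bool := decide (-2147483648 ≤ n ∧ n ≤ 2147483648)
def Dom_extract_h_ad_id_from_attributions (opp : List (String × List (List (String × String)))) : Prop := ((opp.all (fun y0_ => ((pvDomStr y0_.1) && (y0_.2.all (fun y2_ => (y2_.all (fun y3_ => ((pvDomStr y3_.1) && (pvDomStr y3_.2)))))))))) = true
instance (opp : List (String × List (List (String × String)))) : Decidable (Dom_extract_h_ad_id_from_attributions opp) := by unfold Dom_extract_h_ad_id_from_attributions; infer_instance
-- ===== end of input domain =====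

-- ===== PORT A =====
-- B changes the decomposition: forward fold with an overwritten accumulator instead of A's reversed scan with early return (objective: simpler).
-- Python truthiness of a str-or-None value: None and "" are falsy
def pvTruthy (o : Option String) : Bool :=
  match o with
  | some s => !(s == "")
  | none => false

-- Python `x or y` on str-or-None values
def pvOr (a b : Option String) : Option String := if pvTruthy a then a else b

-- attr.get('h_ad_id') or attr.get('utmAdId') or attr.get('adId')
def pvCand (attr : List (String × String)) : Option String :=
  pvOr (PySem.Dict.get? (PySem.Dict.mk attr) "h_ad_id") (pvOr (PySem.Dict.get? (PySem.Dict.mk attr) "utmAdId") (PySem.Dict.get? (PySem.Dict.mk attr) "adId"))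

-- the `for attr in reversed(attributions): ... return h_ad_id` loop (argument already reversed)
def pvScanA : List (List (String × String)) → Option String
  | [] => none
  | attr :: rest =>
    let h := pvCand attr
    if pvTruthy h then h else pvScanA rest

def extract_h_ad_id_from_attributions (opp : List (String × List (List (String × String)))) : Option String :=
  let attributions := PySem.Dict.getD (PySem.Dict.mk opp) "attributions" []
  if attributions.isEmpty then none
  else pvScanA attributions.reverse

-- ===== PORT B =====
def extract_h_ad_id_from_attributions_alt (opp : List (String × List (List (String × String)))) : Option String :=
  (PySem.Dict.getD (PySem.Dict.mk opp) "attributions" []).foldl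
    (fun last attr =>
      let cand := pvCand attr
      if pvTruthy cand then cand else last)
    none

-- ===== PRECONDITION & SPEC =====
def Spec_extract_h_ad_id_from_attributions (opp : List (String × List (List (String × String)))) (out : Option String) : Prop := out = extract_h_ad_id_from_attributions_alt opp
instance (opp : List (String × List (List (String × String)))) (out : Option String) : Decidable (Spec_extract_h_ad_id_from_attributions opp out) := by unfold Spec_extract_h_ad_id_from_attributions; infer_instance

-- ===== CLAIM (what is proved, stated in full; the proofs are below) =====
def Claim_equal_extract_h_ad_id_from_attributions : Prop := ∀ (opp : List (String × List (List (String × String)))), Dom_extract_h_ad_id_from_attributions opp → Spec_extract_h_ad_id_from_attributions opp (extract_h_ad_id_from_attributions opp)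

-- ===== LEMMAS AND PROOFS =====
-- A's reversed early-return scan of m equals B's forward fold over m.reverse
theorem pvScanA_eq_foldl_reverse (m : List (List (String × String))) :
    pvScanA m = m.reverse.foldl
      (fun last attr => let cand := pvCand attr; if pvTruthy cand then cand else last) none := by
  induction m with
  | nil => rfl
  | cons a t ih =>
    simp [pvScanA, List.foldl_append, ih]

-- ===== VERDICT (by name: the statement is the Claim_ definition above) =====
theorem extract_h_ad_id_from_attributions_spec : Claim_equal_extract_h_ad_id_from_attributions := by
  intro opp _
  unfold Spec_extract_h_ad_id_from_attributions extract_h_ad_id_from_attributions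
    extract_h_ad_id_from_attributions_alt
  have h := pvScanA_eq_foldl_reverse (PySem.Dict.getD (PySem.Dict.mk opp) "attributions" []).reverse
  rcases hl : PySem.Dict.getD (PySem.Dict.mk opp) "attributions" [] with _ | ⟨a, t⟩ <;>
    simp_all [List.isEmpty]
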